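-- pv_equiv track=rewrite | github.com/Historical-AI-Lab/novelty | perplexity/MeasureArticlePerplexity.py | create_paired_list
-- ===== SOURCE A (Python) =====
-- def create_paired_list(items, offset=120):
--     n = len(items)
--     paired_list = []
--     used_indices = set()  # To keep track of which indices have been used
--
--     # Create pairs where possible
--     for i in range(n):
--         pair_index = i + offset
--         if pair_index < n and i not in used_indices and pair_index not in used_indices:
--             # Pair the current item with the item 'offset' places ahead
--             paired_list.append([items[i], items[pair_index]])
--             used_indices.add(i)
--             used_indices.add(pair_index)
--         elif i not in used_indices:
--             # If no pair is possible, add the item as a singleton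
--             paired_list.append([items[i]])
--             used_indices.add(i)
--
--     return paired_list
-- ===== SOURCE B (Python) =====
-- def create_paired_list(items, offset=120):
--     n = len(items)
--     paired_list = []
--     for start in range(0, n, 2 * offset):
--         for j in range(offset):
--             src = start + j
--             if src >= n:
--                 break
--             tgt = src + offset
--             if tgt < n:
--                 paired_list.append([items[src], items[tgt]])
--             else:
--                 paired_list.append([items[src]])
--     return paired_list
-- ===== Notes on version B (the rewrite author's own statement) =====
-- stated objective: alternative
-- what changed: B drops A's used-indices set entirely: it iterates chunk starts in strides of 2*offset and emits pairs/singletons directly from the first offset slots of each chunk, exploiting that A's set bookkeeping just encodes this block structure.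
-- outside the precondition, e.g. on create_paired_list([1, 2, 3], 0): A returns [[1, 1], [2, 2], [3, 3]], B raises ValueError; on create_paired_list([1, 2, 3], -1): A returns [[1, 3], [2], [3]], B returns []
import Mathlib
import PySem

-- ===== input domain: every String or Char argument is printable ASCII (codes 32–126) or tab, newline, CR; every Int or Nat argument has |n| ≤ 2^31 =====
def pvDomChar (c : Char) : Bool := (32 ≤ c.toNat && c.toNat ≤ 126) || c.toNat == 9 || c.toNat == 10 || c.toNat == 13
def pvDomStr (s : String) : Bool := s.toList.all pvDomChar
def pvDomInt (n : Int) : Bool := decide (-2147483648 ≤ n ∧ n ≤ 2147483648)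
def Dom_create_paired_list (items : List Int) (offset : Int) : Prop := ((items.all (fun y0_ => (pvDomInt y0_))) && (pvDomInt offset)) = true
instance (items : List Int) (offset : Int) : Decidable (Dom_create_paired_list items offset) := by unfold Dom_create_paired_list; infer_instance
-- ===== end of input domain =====

-- B replaces A's used-set bookkeeping by a nested chunk loop (strides of 2*offset, sources = the first offset slots
-- of each chunk), producing the same pairs/singletons with no set at all (objective: alternative decomposition).

-- ===== PORT A =====
def create_paired_list (items : List Int) (offset : Int) : List (List Int) :=
  let n : Int := (items.length : Int)
  ((PySem.List.pyRange 0 n 1).foldl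
    (fun (st : List (List Int) × PySem.Set Int) (i : Int) =>
      let pair_index := i + offset
      if pair_index < n ∧ st.2.contains i = false ∧ st.2.contains pair_index = false then
        (st.1 ++ [[PySem.List.pyGetD items i 0, PySem.List.pyGetD items pair_index 0]],
         (st.2.add i).add pair_index)
      else if st.2.contains i = false then
        (st.1 ++ [[PySem.List.pyGetD items i 0]], st.2.add i)
      else st)
    ([], PySem.Set.empty)).1

-- ===== PORT B =====
-- the inner 'for j in range(offset)' loop of Source B with its 'break' once src >= n; Python's range is a lazy
-- iterator, so it is ported as a counter recursion on j (exact: the break bounds the iteration by n - start)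
def pvInnerB (items : List Int) (offset n start j : Int) : List (List Int) :=
  if j < offset then
    let src := start + j
    if _hsrc : n ≤ src then []
    else
      let tgt := src + offset
      (if tgt < n then [[PySem.List.pyGetD items src 0, PySem.List.pyGetD items tgt 0]]
       else [[PySem.List.pyGetD items src 0]]) ++ pvInnerB items offset n start (j + 1)
  else []
termination_by (n - start - j).toNat
decreasing_by omega

def create_paired_list_alt (items : List Int) (offset : Int) : List (List Int) :=
  let n : Int := (items.length : Int)
  (PySem.List.pyRange 0 n (2 * offset)).foldl
    (fun pl s => pl ++ pvInnerB items offset n s 0) []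

-- ===== PRECONDITION & SPEC =====
-- Pre_ restricts to positive offsets, the function's natural domain: for offset = 0 A self-pairs every item through
-- a used-set accident, and for offset < 0 A reads items via Python negative-index wraparound (raising IndexError
-- once offset < -len(items)); B's chunked loop does not reproduce those artefacts.
def Pre_create_paired_list (items : List Int) (offset : Int) : Prop := 1 ≤ offset
instance (items : List Int) (offset : Int) : Decidable (Pre_create_paired_list items offset) := by unfold Pre_create_paired_list; infer_instance
def pvWitness_create_paired_list : List Int × Int := ([3, 1, 4, 1, 5], 2)

def Spec_create_paired_list (items : List Int) (offset : Int) (out : List (List Int)) : Prop := out = create_paired_list_alt items offset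
instance (items : List Int) (offset : Int) (out : List (List Int)) : Decidable (Spec_create_paired_list items offset out) := by unfold Spec_create_paired_list; infer_instance

-- ===== CLAIM (what is proved, stated in full; the proofs are below) =====
def Claim_equal_create_paired_list : Prop := ∀ (items : List Int) (offset : Int), Dom_create_paired_list items offset → Pre_create_paired_list items offset → Spec_create_paired_list items offset (create_paired_list items offset)

-- ===== LEMMAS AND PROOFS =====

-- A's loop over an arbitrary index range, as a named function
def pvA_loop (items : List Int) (offset : Int) (l : List Int)
    (st : List (List Int) × PySem.Set Int) : List (List Int) × PySem.Set Int :=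
  l.foldl
    (fun (st : List (List Int) × PySem.Set Int) (i : Int) =>
      let pair_index := i + offset
      if pair_index < (items.length : Int) ∧ st.2.contains i = false ∧ st.2.contains pair_index = false then
        (st.1 ++ [[PySem.List.pyGetD items i 0, PySem.List.pyGetD items pair_index 0]],
         (st.2.add i).add pair_index)
      else if st.2.contains i = false then
        (st.1 ++ [[PySem.List.pyGetD items i 0]], st.2.add i)
      else st)
    st

theorem pvA_eq_loop (items : List Int) (offset : Int) :
    create_paired_list items offset
      = (pvA_loop items offset (PySem.List.pyRange 0 (items.length : Int) 1) ([], PySem.Set.empty)).1 := rfl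

theorem pvA_loop_cons (items : List Int) (offset i : Int) (l : List Int)
    (st : List (List Int) × PySem.Set Int) :
    pvA_loop items offset (i :: l) st = pvA_loop items offset l
      (let pair_index := i + offset
       if pair_index < (items.length : Int) ∧ st.2.contains i = false ∧ st.2.contains pair_index = false then
        (st.1 ++ [[PySem.List.pyGetD items i 0, PySem.List.pyGetD items pair_index 0]],
         (st.2.add i).add pair_index)
       else if st.2.contains i = false then
        (st.1 ++ [[PySem.List.pyGetD items i 0]], st.2.add i)
       else st) := rfl

theorem pvA_loop_append (items : List Int) (offset : Int) (l1 l2 : List Int)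
    (st : List (List Int) × PySem.Set Int) :
    pvA_loop items offset (l1 ++ l2) st = pvA_loop items offset l2 (pvA_loop items offset l1 st) :=
  List.foldl_append

-- the membership invariant of A's used-set inside the chunk starting at s, after t sources were processed
def pvInv (offset n s t x : Int) : Prop :=
  (0 ≤ x ∧ x < s + t) ∨ (s + offset ≤ x ∧ x < s + t + offset ∧ x < n)

-- cons/nil forms of range(a, b, k) for a positive step k
theorem pvRange_pos_nil (a b k : Int) (hk : 0 < k) (h : b ≤ a) :
    PySem.List.pyRange a b k = [] := by
  rw [PySem.List.pyRange_of_pos a b hk]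
  simp [show ¬ a < b by omega]

theorem pvRange_pos_cons (a b k : Int) (hk : 0 < k) (h : a < b) :
    PySem.List.pyRange a b k = a :: PySem.List.pyRange (a + k) b k := by
  rw [PySem.List.pyRange_of_pos a b hk, PySem.List.pyRange_of_pos (a+k) b hk]
  have hm : ((b - a + k - 1) / k).toNat = (if a + k < b then ((b - (a+k) + k - 1) / k).toNat else 0) + 1 := by
    split
    · have heq : (b - a + k - 1) / k = (b - (a+k) + k - 1) / k + 1 := by
        have := Int.add_mul_ediv_right (b - (a+k) + k - 1) 1 (by omega : k ≠ 0)
        rw [← this]; ring_nf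
      rw [heq]
      have h0 : 0 ≤ (b - (a+k) + k - 1) / k := Int.ediv_nonneg (by omega) (by omega)
      omega
    · have h1 : (b - a + k - 1) / k = 1 := by
        rw [← PySem.Int.floordiv_eq_ediv_of_pos hk, PySem.Int.floordiv_eq_iff_of_pos hk]
        omega
      omega
  rw [hm]
  simp only [if_pos h, List.range_succ_eq_map, List.map_cons, List.map_map]
  refine congrArg₂ _ (by ring) (List.map_congr_left ?_)
  intro j _
  simp only [Function.comp_apply]
  push_cast
  ring

-- the inner B loop is a map over the source indices of the chunk
theorem pvInnerB_eq (items : List Int) (offset s : Int) :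
    ∀ (k : ℕ) (j : Int), 0 ≤ j →
      (min (items.length : Int) (s + offset) - (s + j)).toNat = k →
      pvInnerB items offset (items.length : Int) s j
        = (PySem.List.pyRange (s + j) (min (items.length : Int) (s + offset)) 1).map
            (fun i => if i + offset < (items.length : Int) then
                [PySem.List.pyGetD items i 0, PySem.List.pyGetD items (i + offset) 0]
              else [PySem.List.pyGetD items i 0]) := by
  intro k
  induction k with
  | zero =>
    intro j hj hjk
    rw [PySem.List.pyRange_one_eq_nil (by omega), pvInnerB]
    by_cases hjo : j < offset
    · rw [if_pos hjo, dif_pos (by omega : (items.length : Int) ≤ s + j)]; rfl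
    · rw [if_neg hjo]; rfl
  | succ k ih =>
    intro j hj hjk
    have hjo : j < offset := by omega
    have hn : s + j < (items.length : Int) := by omega
    rw [pvInnerB, if_pos hjo, dif_neg (by omega : ¬ (items.length : Int) ≤ s + j)]
    rw [PySem.List.pyRange_one_cons (by omega : s + j < min (items.length : Int) (s + offset))]
    rw [List.map_cons]
    have := ih (j+1) (by omega) (by omega)
    rw [show s + (j + 1) = s + j + 1 by ring] at this
    rw [this]
    rcases lt_or_ge (s + j + offset) (items.length : Int) with h | h
    · simp [if_pos h]
    · simp [if_neg (by omega : ¬ (s + j + offset < (items.length : Int)))]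

-- A's loop does nothing on a block of already-used indices
theorem pvSkip (items : List Int) (offset : Int) :
    ∀ (k : ℕ) (a : Int) (st : List (List Int) × PySem.Set Int),
      (∀ i, a ≤ i → i < a + (k : Int) → st.2.contains i = true) →
      pvA_loop items offset (PySem.List.pyRange a (a + (k : Int)) 1) st = st := by
  intro k
  induction k with
  | zero => intro a st _; rw [PySem.List.pyRange_one_eq_nil (by omega)]; rfl
  | succ k ih =>
    intro a st h
    rw [PySem.List.pyRange_one_cons (by push_cast; omega), pvA_loop_cons]
    have ha : st.2.contains a = true := h a le_rfl (by push_cast; omega)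
    simp only [ha]
    rw [if_neg (by simp), if_neg (by simp)]
    have : a + ((k:ℕ)+1 : ℕ) = (a + 1) + (k : Int) := by push_cast; ring
    rw [this] at *
    exact ih (a+1) st (fun i h1 h2 => h i (by omega) (by omega))

-- phase 1: A's loop over the source half of a chunk appends exactly B's chunk output and extends the invariant
theorem pvPhase1 (items : List Int) (offset s : Int) (hoff : 1 ≤ offset) (hs : 0 ≤ s) :
    ∀ (k : ℕ) (j : Int) (st : List (List Int) × PySem.Set Int), 0 ≤ j → j ≤ offset →
      s + j ≤ min (items.length : Int) (s + offset) →
      (min (items.length : Int) (s + offset) - (s + j)).toNat = k →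
      (∀ x, st.2.contains x = true ↔ pvInv offset (items.length : Int) s j x) →
      (pvA_loop items offset (PySem.List.pyRange (s + j) (min (items.length : Int) (s + offset)) 1) st).1
          = st.1 ++ (PySem.List.pyRange (s + j) (min (items.length : Int) (s + offset)) 1).map
              (fun i => if i + offset < (items.length : Int) then
                  [PySem.List.pyGetD items i 0, PySem.List.pyGetD items (i + offset) 0]
                else [PySem.List.pyGetD items i 0])
        ∧ (∀ x, (pvA_loop items offset (PySem.List.pyRange (s + j) (min (items.length : Int) (s + offset)) 1) st).2.contains x = true
            ↔ pvInv offset (items.length : Int) s (min (items.length : Int) (s + offset) - s) x) := by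
  intro k
  induction k with
  | zero =>
    intro j st hj hjo hjm hk hinv
    have hnil : min (items.length : Int) (s + offset) ≤ s + j := by omega
    rw [PySem.List.pyRange_one_eq_nil hnil]
    have hms : min (items.length : Int) (s + offset) - s = j := by omega
    refine ⟨by simp [pvA_loop], fun x => ?_⟩
    show st.2.contains x = true ↔ _
    rw [hinv x, hms]
  | succ k ih =>
    intro j st hj hjo hjm hk hinv
    set n : Int := (items.length : Int) with hn
    have hjlt : s + j < min n (s + offset) := by omega
    rw [PySem.List.pyRange_one_cons hjlt, pvA_loop_cons]
    have hqi : st.2.contains (s + j) = false := by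
      rw [Bool.eq_false_iff, Ne, hinv]
      unfold pvInv; omega
    have hqp : st.2.contains (s + j + offset) = false := by
      rw [Bool.eq_false_iff, Ne, hinv]
      unfold pvInv; omega
    have hnext : s + j + 1 = s + (j + 1) := by ring
    rcases lt_or_ge (s + j + offset) n with hpair | hsing
    · rw [if_pos ⟨hpair, hqi, hqp⟩]
      have hinv' : ∀ x, ((st.2.add (s+j)).add (s+j+offset)).contains x = true ↔ pvInv offset n s (j+1) x := by
        intro x
        rw [PySem.Set.contains_iff, PySem.Set.mem_add, PySem.Set.mem_add, ← PySem.Set.contains_iff, hinv]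
        unfold pvInv; omega
      obtain ⟨h1, h2⟩ := ih (j+1)
        (st.1 ++ [[PySem.List.pyGetD items (s+j) 0, PySem.List.pyGetD items (s+j+offset) 0]],
         (st.2.add (s+j)).add (s+j+offset)) (by omega) (by omega) (by omega) (by omega) hinv'
      rw [hnext, h1]
      refine ⟨?_, h2⟩
      simp [List.map_cons, if_pos hpair]
    · rw [if_neg (by rw [hqi, hqp]; simp; omega), if_pos hqi]
      have hinv' : ∀ x, (st.2.add (s+j)).contains x = true ↔ pvInv offset n s (j+1) x := by
        intro x
        rw [PySem.Set.contains_iff, PySem.Set.mem_add, ← PySem.Set.contains_iff, hinv]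
        unfold pvInv; omega
      obtain ⟨h1, h2⟩ := ih (j+1)
        (st.1 ++ [[PySem.List.pyGetD items (s+j) 0]], st.2.add (s+j))
        (by omega) (by omega) (by omega) (by omega) hinv'
      rw [hnext, h1]
      refine ⟨?_, h2⟩
      simp [List.map_cons, if_neg (by omega : ¬ (s + j + offset < n))]

-- main chunk induction: from any chunk boundary s with used = [0, s), A's remaining loop appends B's remaining chunks
theorem pvMain (items : List Int) (offset : Int) (hoff : 1 ≤ offset) :
    ∀ (k : ℕ) (s : Int) (st : List (List Int) × PySem.Set Int), 0 ≤ s →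
      ((items.length : Int) - s).toNat ≤ k →
      (∀ x, st.2.contains x = true ↔ (0 ≤ x ∧ x < s)) →
      (pvA_loop items offset (PySem.List.pyRange s (items.length : Int) 1) st).1
        = st.1 ++ (PySem.List.pyRange s (items.length : Int) (2 * offset)).flatMap
            (fun s' => pvInnerB items offset (items.length : Int) s' 0) := by
  intro k
  induction k with
  | zero =>
    intro s st hs hk hinv
    rw [PySem.List.pyRange_one_eq_nil (by omega),
        pvRange_pos_nil s (items.length : Int) (2 * offset) (by omega) (by omega)]
    simp [pvA_loop]
  | succ k ih =>
    intro s st hs hk hinv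
    set n : Int := (items.length : Int) with hn
    by_cases hsn : n ≤ s
    · rw [PySem.List.pyRange_one_eq_nil (by omega),
          pvRange_pos_nil s n (2 * offset) (by omega) (by omega)]
      simp [pvA_loop]
    · have hsn' : s < n := by omega
      set m1 : Int := min n (s + offset) with hm1
      set m2 : Int := min n (s + 2 * offset) with hm2
      have hsplit : PySem.List.pyRange s n 1
          = PySem.List.pyRange s m1 1 ++ (PySem.List.pyRange m1 m2 1 ++ PySem.List.pyRange m2 n 1) := by
        rw [← PySem.List.pyRange_one_append m1 m2 n (by omega) (by omega),
            ← PySem.List.pyRange_one_append s m1 n (by omega) (by omega)]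
      rw [hsplit, pvA_loop_append, pvA_loop_append]
      have hinv0 : ∀ x, st.2.contains x = true ↔ pvInv offset n s 0 x := by
        intro x; rw [hinv]; unfold pvInv; omega
      obtain ⟨h1, h2⟩ := pvPhase1 items offset s hoff hs (m1 - s - 0).toNat 0 st le_rfl (by omega)
        (by omega) (by omega) hinv0
      rw [show s + 0 = s by ring] at h1 h2
      set st1 := pvA_loop items offset (PySem.List.pyRange s m1 1) st with hst1
      -- phase 2: indices [m1, m2) are all used, the loop skips them
      have hskip : pvA_loop items offset (PySem.List.pyRange m1 m2 1) st1 = st1 := by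
        have hm2eq : m2 = m1 + ((m2 - m1).toNat : Int) := by omega
        rw [hm2eq]
        exact pvSkip items offset (m2 - m1).toNat m1 st1
          (fun i hi1 hi2 => by rw [h2]; unfold pvInv; omega)
      rw [hskip]
      by_cases hlast : n ≤ s + 2 * offset
      · -- last chunk
        rw [show m2 = n by omega, PySem.List.pyRange_one_eq_nil le_rfl]
        rw [pvRange_pos_cons s n (2 * offset) (by omega) hsn',
            pvRange_pos_nil (s + 2 * offset) n (2 * offset) (by omega) (by omega)]
        show st1.1 = _
        rw [h1]
        simp only [List.flatMap_cons, List.flatMap_nil, List.append_nil]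
        rw [pvInnerB_eq items offset s (min ((items.length : Int)) (s + offset) - (s + 0)).toNat 0 le_rfl rfl]
        rw [show s + 0 = s by ring]
      · -- recurse into the next chunk
        have hm2eq : m2 = s + 2 * offset := by omega
        have hinv2 : ∀ x, st1.2.contains x = true ↔ (0 ≤ x ∧ x < s + 2 * offset) := by
          intro x; rw [h2]; unfold pvInv; omega
        rw [hm2eq] at *
        have := ih (s + 2 * offset) st1 (by omega) (by omega) hinv2
        rw [this, h1]
        rw [pvRange_pos_cons s n (2 * offset) (by omega) hsn', List.flatMap_cons]
        rw [pvInnerB_eq items offset s (min ((items.length : Int)) (s + offset) - (s + 0)).toNat 0 le_rfl rfl]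
        rw [show s + 0 = s by ring]
        simp

-- ===== VERDICT (by name: the statement is the Claim_ definition above) =====
theorem create_paired_list_spec : Claim_equal_create_paired_list := by
  intro items offset _ hpre
  unfold Spec_create_paired_list
  rw [pvA_eq_loop]
  have h0 : ∀ x, (PySem.Set.empty : PySem.Set Int).contains x = true ↔ (0 ≤ x ∧ x < 0) := by
    intro x
    simp [PySem.Set.empty]
  rw [pvMain items offset hpre ((items.length : Int) - 0).toNat 0 ([], PySem.Set.empty) le_rfl le_rfl h0]
  show _ = create_paired_list_alt items offset
  unfold create_paired_list_alt
  rw [PySem.List.foldl_append_eq_flatMap]
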